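-- pv_equiv track=rewrite | github.com/Vangogh911/homework_python_3 | Ex_2.py | mirror_mul
-- ===== SOURCE A (Python) =====
-- def mirror_mul(numbers):
--     result_list = []
--     for i in range(int(len(numbers) / 2)):
--         j = (i + 1) * -1
--         result_list.append(numbers[i] * numbers[j])
--     if (len(numbers) % 2) != 0:
--         i = (int(len(numbers) / 2))
--         result_list.append(numbers[i]**2)
--     return result_list
-- ===== SOURCE B (Python) =====
-- def mirror_mul(numbers):
--     products = [x * y for x, y in zip(numbers, reversed(numbers))]
--     return products[:(len(numbers) + 1) // 2]
-- ===== Notes on version B (the rewrite author's own statement) =====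
-- stated objective: alternative
-- what changed: Instead of a half-length indexed loop with a separate parity branch, B builds the full elementwise product of the list with its reversal in one zip pass and truncates it to the first ceil(n/2) entries, the odd middle square falling out of the zip itself.
import Mathlib
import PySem

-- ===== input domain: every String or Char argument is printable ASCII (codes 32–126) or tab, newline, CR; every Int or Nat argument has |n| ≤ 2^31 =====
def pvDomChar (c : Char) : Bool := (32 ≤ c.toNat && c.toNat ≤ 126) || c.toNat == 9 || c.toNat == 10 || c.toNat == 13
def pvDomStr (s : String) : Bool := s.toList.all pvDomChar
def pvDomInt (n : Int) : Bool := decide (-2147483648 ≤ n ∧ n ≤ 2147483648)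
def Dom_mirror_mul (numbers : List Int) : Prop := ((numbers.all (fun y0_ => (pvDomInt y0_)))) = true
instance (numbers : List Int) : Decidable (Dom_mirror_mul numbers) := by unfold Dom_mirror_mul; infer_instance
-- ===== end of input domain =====

-- B replaces A's half-length indexed loop plus parity branch by one zip pass multiplying the
-- list with its reversal, truncated to the first ceil(n/2) entries; alternative decomposition.

-- ===== PORT A =====
-- for i in range(int(len/2)): append xs[i]*xs[-(i+1)]; if len odd append xs[len//2]**2
def mirror_mul (numbers : List Int) : List Int :=
  let n : Int := numbers.length
  let result_list :=
    (PySem.List.pyRange 0 (PySem.Int.floordiv n 2) 1).foldl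
      (fun acc i =>
        acc ++ [PySem.List.pyGetD numbers i 0 * PySem.List.pyGetD numbers ((i + 1) * (-1)) 0]) []
  if PySem.Int.mod n 2 ≠ 0 then
    result_list ++ [PySem.List.pyGetD numbers (PySem.Int.floordiv n 2) 0 ^ 2]
  else
    result_list

-- ===== PORT B =====
-- products = [x*y for x,y in zip(numbers, reversed(numbers))]; return products[:(len+1)//2]
def mirror_mul_alt (numbers : List Int) : List Int :=
  let products := (numbers.zip numbers.reverse).map (fun p => p.1 * p.2)
  PySem.List.slice products none
    (some (PySem.Int.floordiv ((numbers.length : Int) + 1) 2))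

-- ===== PRECONDITION & SPEC =====
def Spec_mirror_mul (numbers : List Int) (out : List Int) : Prop := out = mirror_mul_alt numbers
instance (numbers : List Int) (out : List Int) : Decidable (Spec_mirror_mul numbers out) := by unfold Spec_mirror_mul; infer_instance

-- ===== CLAIM (what is proved, stated in full; the proofs are below) =====
def Claim_equal_mirror_mul : Prop := ∀ (numbers : List Int), Dom_mirror_mul numbers → Spec_mirror_mul numbers (mirror_mul numbers)

-- ===== LEMMAS AND PROOFS =====

-- A's negative mirror index equals the index from the right end.
lemma pyGetD_neg_mirror (xs : List Int) (i : Int) (h0 : 0 ≤ i) (h1 : i < (xs.length : Int)) :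
    PySem.List.pyGetD xs ((i + 1) * (-1)) 0 = PySem.List.pyGetD xs ((xs.length : Int) - 1 - i) 0 := by
  have hk : (i + 1) * (-1) = -((i.toNat + 1 : Nat) : Int) := by omega
  have hr : (xs.length : Int) - 1 - i = ((xs.length - (i.toNat + 1) : Nat) : Int) := by omega
  rw [hk, PySem.List.pyGetD_neg_natCast xs (i.toNat + 1) 0 (by omega) (by omega), hr,
    PySem.List.pyGetD_natCast]
  rw [List.getD_eq_getElem xs 0 (by omega)]

-- ===== VERDICT (by name: the statement is the Claim_ definition above) =====
theorem mirror_mul_spec : Claim_equal_mirror_mul := by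
  intro numbers _
  unfold Spec_mirror_mul mirror_mul mirror_mul_alt
  simp only [PySem.List.foldl_append_singleton_eq_map, List.nil_append]
  set n := numbers.length with hn
  have hfd : PySem.Int.floordiv (n : Int) 2 = ((n / 2 : Nat) : Int) := by
    exact_mod_cast PySem.Int.floordiv_natCast n 2
  have hfd1 : PySem.Int.floordiv ((n : Int) + 1) 2 = (((n + 1) / 2 : Nat) : Int) := by
    have : ((n : Int) + 1) = ((n + 1 : Nat) : Int) := by push_cast; ring
    rw [this]; exact_mod_cast PySem.Int.floordiv_natCast (n + 1) 2
  have hmod : PySem.Int.mod (n : Int) 2 = ((n % 2 : Nat) : Int) := by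
    exact_mod_cast PySem.Int.mod_natCast n 2
  rw [hfd, hfd1, hmod, PySem.List.slice_to_natCast]
  have hlenP : ((numbers.zip numbers.reverse).map (fun p => p.1 * p.2)).length = n := by
    simp [hn]
  -- element formula for B's product list
  have hP : ∀ (k : Nat) (hk : k < n),
      ((numbers.zip numbers.reverse).map (fun p => p.1 * p.2))[k]'(by rw [hlenP]; exact hk) =
        numbers[k]'hk * numbers[n - 1 - k]'(by omega) := by
    intro k hk
    simp [List.getElem_zip, List.getElem_reverse, hn]
  -- element formula for A's map over the range
  have hA : ∀ (k : Nat) (hk : k < n / 2),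
      ((PySem.List.pyRange 0 ((n / 2 : Nat) : Int) 1).map
        (fun i => PySem.List.pyGetD numbers i 0 * PySem.List.pyGetD numbers ((i + 1) * (-1)) 0))[k]'
        (by simp [PySem.List.length_pyRange_one]; omega) =
        numbers[k]'(by omega) * numbers[n - 1 - k]'(by omega) := by
    intro k hk
    rw [List.getElem_map, PySem.List.getElem_pyRange_one, zero_add]
    rw [pyGetD_neg_mirror numbers k (by omega) (by rw [← hn]; exact_mod_cast (by omega : k < n))]
    have h1 : PySem.List.pyGetD numbers (k : Int) 0 = numbers[k]'(by omega) := by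
      rw [PySem.List.pyGetD_natCast, List.getD_eq_getElem numbers 0 (by omega)]
    have h2 : ((numbers.length : Int) - 1 - k) = ((n - 1 - k : Nat) : Int) := by
      rw [← hn]; omega
    rw [h1, h2, PySem.List.pyGetD_natCast, List.getD_eq_getElem numbers 0 (by omega)]
  by_cases hpar : n % 2 = 0
  · rw [if_neg (show ¬((n % 2 : Nat) : Int) ≠ 0 by omega)]
    apply List.ext_getElem
    · simp [PySem.List.length_pyRange_one, hlenP]; omega
    · intro k h1 h2
      have hk : k < n / 2 := by
        simp [PySem.List.length_pyRange_one] at h1; omega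
      rw [List.getElem_take, hA k hk, hP k (by omega)]
  · rw [if_pos (show ((n % 2 : Nat) : Int) ≠ 0 by omega)]
    apply List.ext_getElem
    · simp [PySem.List.length_pyRange_one, hlenP]; omega
    · intro k h1 h2
      have hklt : k < (n + 1) / 2 := by
        have := h1; simp [PySem.List.length_pyRange_one] at this; omega
      rw [List.getElem_take]
      by_cases hk : k < n / 2
      · rw [List.getElem_append_left (by simp [PySem.List.length_pyRange_one]; omega),
          hA k hk, hP k (by omega)]
      · have hkeq : k = n / 2 := by omega
        rw [List.getElem_append_right (by simp [PySem.List.length_pyRange_one]; omega),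
          List.getElem_singleton, hP k (by omega)]
        have hmid : PySem.List.pyGetD numbers ((n / 2 : Nat) : Int) 0 =
            numbers[n / 2]'(by omega) := by
          rw [PySem.List.pyGetD_natCast, List.getD_eq_getElem numbers 0 (by omega)]
        have hidx : n - 1 - k = n / 2 := by omega
        subst hkeq
        simp [hidx, pow_two]
        rw [show ((n : Int)) / 2 = ((n / 2 : Nat) : Int) by omega, hmid]
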